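-- pv_equiv track=rewrite | github.com/huynhtai17-4/Chat-P2P | app/data_migration.py | merge_peers
-- ===== SOURCE A (Python) =====
-- from typing import Dict, List, Optional
--
-- def merge_peers(source_peers: Dict, target_peers: Dict) -> Dict:
--     """Merge two peer dictionaries, keeping the most recent data."""
--     merged = target_peers.copy()
--     for peer_id, peer_info in source_peers.items():
--         if peer_id not in merged:
--             merged[peer_id] = peer_info
--         else:
--             # Keep the one with more recent last_seen
--             source_last_seen = peer_info.get("last_seen", 0)
--             target_last_seen = merged[peer_id].get("last_seen", 0)
--             if source_last_seen > target_last_seen: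
--                 merged[peer_id] = peer_info
--     return merged
-- ===== SOURCE B (Python) =====
-- def merge_peers(source_peers, target_peers):
--     """Merge two peer dictionaries, keeping the most recent data."""
--     # Stage 1: bucket every candidate info per peer id (target first, then source),
--     # so key order is target's keys followed by source-only keys, as in A's result.
--     buckets = {}
--     for peers in (target_peers, source_peers):
--         for peer_id, peer_info in peers.items():
--             buckets.setdefault(peer_id, []).append(peer_info)
--     # Stage 2: reduce each bucket with max; ties pick the first (target) candidate.
--     return {peer_id: max(candidates, key=lambda info: info.get("last_seen", 0))
--             for peer_id, candidates in buckets.items()}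
-- ===== Notes on version B (the rewrite author's own statement) =====
-- stated objective: alternative
-- what changed: Replaces A's copy-then-conditional-overwrite fold with a two-stage bucket-then-reduce: one grouping pass collects every candidate info per peer id (target first), then each bucket is reduced with max(key=last_seen), whose first-on-tie rule yields A's tie-break toward target. Pre_ only excludes association lists with duplicate outer keys, which cannot arise from Python dicts.
import Mathlib
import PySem

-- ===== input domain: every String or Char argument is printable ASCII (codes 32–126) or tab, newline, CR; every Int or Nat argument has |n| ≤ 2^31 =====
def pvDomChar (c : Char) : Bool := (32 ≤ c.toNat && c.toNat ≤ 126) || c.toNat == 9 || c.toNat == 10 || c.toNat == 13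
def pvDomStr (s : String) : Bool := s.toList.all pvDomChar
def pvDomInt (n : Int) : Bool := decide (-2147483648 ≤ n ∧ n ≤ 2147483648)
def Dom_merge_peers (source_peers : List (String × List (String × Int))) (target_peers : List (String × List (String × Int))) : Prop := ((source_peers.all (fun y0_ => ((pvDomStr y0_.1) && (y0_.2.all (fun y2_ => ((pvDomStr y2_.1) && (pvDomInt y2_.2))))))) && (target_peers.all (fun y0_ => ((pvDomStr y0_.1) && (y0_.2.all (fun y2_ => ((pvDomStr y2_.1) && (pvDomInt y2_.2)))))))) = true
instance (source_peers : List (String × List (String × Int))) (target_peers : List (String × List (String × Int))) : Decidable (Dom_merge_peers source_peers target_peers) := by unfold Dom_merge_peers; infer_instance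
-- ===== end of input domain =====

-- B replaces A's copy-then-conditional-overwrite fold with a two-stage bucket-then-reduce (group all
-- candidate infos per peer id, then take max by last_seen, ties to the first candidate = target);
-- objective: alternative. Equivalence is about the returned dict (neither mutates its inputs).

-- ===== PORT A =====
-- the body of A's loop, named so the fold can cite it
def mpStep (merged : PySem.Dict String (List (String × Int))) (kv : String × List (String × Int)) : PySem.Dict String (List (String × Int)) :=
  if !(merged.contains kv.1) then
    merged.insert kv.1 kv.2
  else
    let source_last_seen := (PySem.Dict.mk kv.2).getD "last_seen" 0
    let target_last_seen := (PySem.Dict.mk (merged.getD kv.1 [])).getD "last_seen" 0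
    if source_last_seen > target_last_seen then merged.insert kv.1 kv.2 else merged

def merge_peers (source_peers : List (String × List (String × Int))) (target_peers : List (String × List (String × Int))) : List (String × List (String × Int)) :=
  (source_peers.foldl mpStep (PySem.Dict.mk target_peers)).items

-- ===== PORT B =====
-- buckets.setdefault(peer_id, []).append(peer_info)  =  modify peer_id [] (· ++ [peer_info])
def mpBucketStep (buckets : PySem.Dict String (List (List (String × Int)))) (kv : String × List (String × Int)) : PySem.Dict String (List (List (String × Int))) :=
  buckets.modify kv.1 [] (fun cs => cs ++ [kv.2])

-- max(candidates, key=lambda info: info.get("last_seen", 0)); candidates is never empty (the .getD [] default is unreachable)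
def mpPickMax (candidates : List (List (String × Int))) : List (String × Int) :=
  (PySem.List.max? candidates (fun info => (PySem.Dict.mk info).getD "last_seen" 0)).getD []

def merge_peers_alt (source_peers : List (String × List (String × Int))) (target_peers : List (String × List (String × Int))) : List (String × List (String × Int)) :=
  let buckets := source_peers.foldl mpBucketStep (target_peers.foldl mpBucketStep PySem.Dict.empty)
  buckets.items.map (fun kc => (kc.1, mpPickMax kc.2))

-- ===== PRECONDITION & SPEC =====
-- Pre_ excludes association lists whose outer key lists contain duplicates: such lists do not arise
-- from Python dicts (A's arguments are dicts, whose keys are unique), so A is never run on them.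
def Pre_merge_peers (source_peers : List (String × List (String × Int))) (target_peers : List (String × List (String × Int))) : Prop :=
  (source_peers.map Prod.fst).Nodup ∧ (target_peers.map Prod.fst).Nodup
instance (source_peers : List (String × List (String × Int))) (target_peers : List (String × List (String × Int))) : Decidable (Pre_merge_peers source_peers target_peers) := by unfold Pre_merge_peers; infer_instance
def pvWitness_merge_peers : (List (String × List (String × Int))) × (List (String × List (String × Int))) :=
  ([("a", [("last_seen", 5)]), ("b", [("last_seen", 1)])], [("a", [("last_seen", 3)]), ("c", [])])

def Spec_merge_peers (source_peers : List (String × List (String × Int))) (target_peers : List (String × List (String × Int))) (out : List (String × List (String × Int))) : Prop := out = merge_peers_alt source_peers target_peers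
instance (source_peers : List (String × List (String × Int))) (target_peers : List (String × List (String × Int))) (out : List (String × List (String × Int))) : Decidable (Spec_merge_peers source_peers target_peers out) := by unfold Spec_merge_peers; infer_instance

-- ===== CLAIM (what is proved, stated in full; the proofs are below) =====
def Claim_equal_merge_peers : Prop := ∀ (source_peers : List (String × List (String × Int))) (target_peers : List (String × List (String × Int))), Dom_merge_peers source_peers target_peers → Pre_merge_peers source_peers target_peers → Spec_merge_peers source_peers target_peers (merge_peers source_peers target_peers)

-- ===== LEMMAS AND PROOFS =====

-- both sides are shown equal to this canonical selection form
def mpCanon (source_peers : List (String × List (String × Int))) (target_peers : List (String × List (String × Int))) : List (String × List (String × Int)) :=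
  target_peers.map (fun kv =>
    match (PySem.Dict.mk source_peers).get? kv.1 with
    | some s => (kv.1, if (PySem.Dict.mk s).getD "last_seen" 0 > (PySem.Dict.mk kv.2).getD "last_seen" 0 then s else kv.2)
    | none => kv)
  ++ source_peers.filter (fun kv => !((PySem.Dict.mk target_peers).contains kv.1))

-- invariant of A's loop: folding the source entries S (distinct keys) into a dict d with unique keys
theorem mp_main (S : List (String × List (String × Int))) (d : PySem.Dict String (List (String × Int)))
    (hS : (S.map Prod.fst).Nodup) (hd : d.keys.Nodup) :
    (S.foldl mpStep d).items =
      d.items.map (fun kv =>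
        match (PySem.Dict.mk S).get? kv.1 with
        | some s => (kv.1, if (PySem.Dict.mk s).getD "last_seen" 0 > (PySem.Dict.mk kv.2).getD "last_seen" 0 then s else kv.2)
        | none => kv)
      ++ S.filter (fun kv => !(d.contains kv.1)) := by
  induction S generalizing d with
  | nil =>
    simp [PySem.Dict.get?]
  | cons h0 tl ih =>
    obtain ⟨k, v⟩ := h0
    simp only [List.map_cons, List.nodup_cons] at hS
    obtain ⟨hk, htl⟩ := hS
    have hget_tl : (PySem.Dict.mk tl).get? k = none := by
      rw [PySem.Dict.get?_eq_none_iff_not_mem_keys]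
      simpa using hk
    have hstep_nodup : (mpStep d (k, v)).keys.Nodup := by
      unfold mpStep
      dsimp only
      split_ifs <;> first
        | exact PySem.Dict.nodup_keys_insert _ _ _ hd
        | exact hd
    have hfold : ((k, v) :: tl).foldl mpStep d = tl.foldl mpStep (mpStep d (k, v)) := rfl
    rw [hfold, ih (mpStep d (k, v)) htl hstep_nodup]
    by_cases hc : d.contains k = true
    · -- key already present: merged stays the same list of keys
      have hfilter : tl.filter (fun kv => !((mpStep d (k, v)).contains kv.1)) =
          tl.filter (fun kv => !(d.contains kv.1)) := by
        apply List.filter_congr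
        intro kv hkv
        have hne : kv.1 ≠ k := by
          intro hEq
          exact hk (hEq ▸ List.mem_map_of_mem hkv)
        unfold mpStep
        dsimp only
        split_ifs <;> simp [PySem.Dict.contains_insert, hne]
      have hhead : ((k, v) :: tl).filter (fun kv => !(d.contains kv.1)) =
          tl.filter (fun kv => !(d.contains kv.1)) := by
        simp [hc]
      rw [hfilter, hhead]
      congr 1
      -- the mapped parts agree pointwise
      by_cases hwin : ((PySem.Dict.mk v).getD "last_seen" 0 : Int) >
          (PySem.Dict.mk (d.getD k [])).getD "last_seen" 0
      · have hstep : mpStep d (k, v) = d.insert k v := by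
          unfold mpStep; dsimp only; simp [hc, hwin]
        rw [hstep, PySem.Dict.items_insert_of_contains _ _ hc, List.map_map]
        apply List.map_congr_left
        rintro ⟨p1, p2⟩ hp
        by_cases hpk : p1 = k
        · subst hpk
          have hval : d.getD p1 [] = p2 := PySem.Dict.getD_of_mem_items _ hp hd []
          rw [hval] at hwin
          simp [Function.comp, PySem.Dict.get?_mk_cons, hget_tl, hwin]
        · simp [Function.comp, hpk, PySem.Dict.get?_mk_cons,
            show (k == p1) = false by simp [Ne.symm hpk]]
      · have hstep : mpStep d (k, v) = d := by
          unfold mpStep; dsimp only; simp [hc, hwin]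
        rw [hstep]
        apply List.map_congr_left
        rintro ⟨p1, p2⟩ hp
        by_cases hpk : p1 = k
        · subst hpk
          have hval : d.getD p1 [] = p2 := PySem.Dict.getD_of_mem_items _ hp hd []
          rw [hval] at hwin
          simp [PySem.Dict.get?_mk_cons, hget_tl, hwin]
        · simp [PySem.Dict.get?_mk_cons,
            show (k == p1) = false by simp [Ne.symm hpk]]
    · -- fresh key: appended at the end
      have hc' : d.contains k = false := by simpa using hc
      have hkd : k ∉ d.keys := by
        rw [PySem.Dict.contains_eq_decide_mem_keys] at hc'
        simpa using hc'
      have hstep : mpStep d (k, v) = d.insert k v := by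
        unfold mpStep; dsimp only; simp [hc']
      rw [hstep, PySem.Dict.items_insert_of_not_contains _ _ hc', List.map_append]
      have hfilter : tl.filter (fun kv => !((d.insert k v).contains kv.1)) =
          tl.filter (fun kv => !(d.contains kv.1)) := by
        apply List.filter_congr
        intro kv hkv
        have hne : kv.1 ≠ k := by
          intro hEq
          exact hk (hEq ▸ List.mem_map_of_mem hkv)
        simp [PySem.Dict.contains_insert, hne]
      have hmap : d.items.map (fun kv =>
          match (PySem.Dict.mk ((k, v) :: tl)).get? kv.1 with
          | some s => (kv.1, if (PySem.Dict.mk s).getD "last_seen" 0 > (PySem.Dict.mk kv.2).getD "last_seen" 0 then s else kv.2)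
          | none => kv) = d.items.map (fun kv =>
          match (PySem.Dict.mk tl).get? kv.1 with
          | some s => (kv.1, if (PySem.Dict.mk s).getD "last_seen" 0 > (PySem.Dict.mk kv.2).getD "last_seen" 0 then s else kv.2)
          | none => kv) := by
        apply List.map_congr_left
        intro p hp
        have hpk : p.1 ≠ k := by
          intro hEq
          exact hkd (hEq ▸ PySem.Dict.mem_keys_of_mem_items _ hp)
        simp [PySem.Dict.get?_mk_cons, show (k == p.1) = false by simp [Ne.symm hpk]]
      rw [hfilter, hmap]
      simp [hc', hget_tl]

-- folding Set.add over a duplicate-free list appends exactly its fresh elements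
theorem set_add_foldl {α : Type} [BEq α] [LawfulBEq α] (l : List α) (s : List α) (hl : l.Nodup) :
    l.foldl PySem.Set.add s = s ++ l.filter (fun x => !(s.contains x)) := by
  induction l generalizing s with
  | nil => simp
  | cons x tl ih =>
    simp only [List.nodup_cons] at hl
    obtain ⟨hx, htl⟩ := hl
    by_cases hmem : x ∈ s
    · have hadd : PySem.Set.add s x = s := by simp [PySem.Set.add, hmem]
      rw [List.foldl_cons, hadd, ih s htl]
      congr 1
      rw [List.filter_cons]
      simp [hmem]
    · have hadd : PySem.Set.add s x = s ++ [x] := by simp [PySem.Set.add, hmem]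
      rw [List.foldl_cons, hadd, ih _ htl]
      have hfilt : tl.filter (fun y => !((s ++ [x]).contains y)) = tl.filter (fun y => !(s.contains y)) := by
        apply List.filter_congr
        intro y hy
        have hyx : y ≠ x := fun h => hx (h ▸ hy)
        simp [hyx]
      rw [hfilt, List.filter_cons]
      simp [hmem, List.append_assoc]
-- an assoc list with duplicate-free keys filters to the singleton of its entry at k
theorem filter_key_singleton {ν : Type} (l : List (String × ν)) (k : String) (v : ν)
    (h : (l.map Prod.fst).Nodup) (hm : (k, v) ∈ l) :
    l.filter (fun p => p.1 == k) = [(k, v)] := by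
  induction l with
  | nil => cases hm
  | cons p tl ih =>
    simp only [List.map_cons, List.nodup_cons] at h
    obtain ⟨hp, htl⟩ := h
    rcases List.mem_cons.mp hm with hm | hm
    · subst hm
      have hnil : tl.filter (fun q => q.1 == k) = [] := by
        apply List.filter_eq_nil_iff.mpr
        intro q hq hqk
        have hq1 : q.1 ∈ tl.map Prod.fst := List.mem_map_of_mem hq
        rw [eq_of_beq hqk] at hq1
        exact absurd hq1 (by simpa using hp)
      simp [hnil]
    · have hpk : (p.1 == k) = false := by
        have : p.1 ≠ k := by
          intro hEq
          exact hp (hEq ▸ (List.mem_map_of_mem hm : (k, v).1 ∈ tl.map Prod.fst))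
        simpa using this
      simp [hpk, ih htl hm]

-- a key absent from the key list filters to []
theorem filter_key_nil {ν : Type} (l : List (String × ν)) (k : String)
    (h : k ∉ l.map Prod.fst) :
    l.filter (fun p => p.1 == k) = [] := by
  apply List.filter_eq_nil_iff.mpr
  intro q hq hqk
  have hq1 : q.1 ∈ l.map Prod.fst := List.mem_map_of_mem hq
  rw [eq_of_beq hqk] at hq1
  exact h hq1

-- reducing a two-candidate bucket with max: the later (source) candidate wins only strictly
theorem pickMax_pair (t s : List (String × Int)) :
    mpPickMax [t, s] = if (PySem.Dict.mk s).getD "last_seen" 0 > (PySem.Dict.mk t).getD "last_seen" 0 then s else t := by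
  simp only [mpPickMax, PySem.List.max?, List.foldl_cons, List.foldl_nil, gt_iff_lt]
  split <;> rfl

theorem pickMax_single (t : List (String × Int)) : mpPickMax [t] = t := by
  simp [mpPickMax, PySem.List.max?]

-- B's bucket-then-reduce equals the canonical selection form
theorem alt_eq_canon (src tgt : List (String × List (String × Int)))
    (hs : (src.map Prod.fst).Nodup) (ht : (tgt.map Prod.fst).Nodup) :
    merge_peers_alt src tgt = mpCanon src tgt := by
  unfold merge_peers_alt mpCanon
  have hfold : src.foldl mpBucketStep (tgt.foldl mpBucketStep PySem.Dict.empty)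
      = (tgt ++ src).foldl (fun d (x : String × List (String × Int)) => d.modify x.1 [] (fun cs => cs ++ [x.2])) PySem.Dict.empty := by
    rw [← List.foldl_append]
    rfl
  dsimp only
  rw [hfold]
  set buckets := (tgt ++ src).foldl (fun d (x : String × List (String × Int)) => d.modify x.1 [] (fun cs => cs ++ [x.2])) PySem.Dict.empty with hb
  -- the buckets' keys: target keys then fresh source keys
  have hkeys : buckets.keys = tgt.map Prod.fst ++ (src.filter (fun kv => !((PySem.Dict.mk tgt).contains kv.1))).map Prod.fst := by
    rw [hb, PySem.Dict.keys_foldl_modify_key (tgt ++ src) Prod.fst [] (fun _ x cs => cs ++ [x.2]),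
      PySem.Dict.keys_empty]
    show (List.map Prod.fst (tgt ++ src)).foldl PySem.Set.add [] = _
    rw [List.map_append, List.foldl_append, set_add_foldl _ _ ht, set_add_foldl _ _ hs]
    have h1 : (tgt.map Prod.fst).filter (fun x => !(List.contains [] x)) = tgt.map Prod.fst := by
      simp
    rw [h1]
    simp only [List.nil_append]
    congr 1
    rw [List.filter_map]
    congr 1
    apply List.filter_congr
    intro kv _
    rw [PySem.Dict.contains_eq_decide_mem_keys, PySem.Dict.keys_mk]
    simp [Function.comp]
  have hnod : buckets.keys.Nodup := by
    rw [hb]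
    exact PySem.Dict.nodup_keys_foldl_modify_key (tgt ++ src) Prod.fst [] (fun _ x cs => cs ++ [x.2])
      PySem.Dict.empty (by simp [PySem.Dict.keys_empty])
  -- the bucket at key k
  have hgetD : ∀ k : String, buckets.getD k [] =
      (tgt.filter (fun p => p.1 == k)).map Prod.snd ++ (src.filter (fun p => p.1 == k)).map Prod.snd := by
    intro k
    rw [hb, PySem.Dict.getD_foldl_modify_append (tgt ++ src) PySem.Dict.empty k, PySem.Dict.getD_empty]
    rw [List.filter_append, List.map_append]
    rfl
  rw [PySem.Dict.items_eq_map_keys buckets hnod [], List.map_map]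
  have hfun : ((fun kc : String × List (List (String × Int)) => (kc.1, mpPickMax kc.2)) ∘
      (fun k => (k, buckets.getD k []))) = fun k => (k, mpPickMax (buckets.getD k [])) := rfl
  rw [hfun, hkeys, List.map_append, List.map_map, List.map_map]
  congr 1
  · -- the target-keys part
    apply List.map_congr_left
    rintro ⟨k, t⟩ hkv
    have htgt : tgt.filter (fun p => p.1 == k) = [(k, t)] := filter_key_singleton tgt k t ht hkv
    cases hg : (PySem.Dict.mk src).get? k with
    | some sv =>
      have hmem : (k, sv) ∈ src := by
        have := (PySem.Dict.get?_eq_some_iff_mem_items (PySem.Dict.mk src) k sv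
          (by rw [PySem.Dict.keys_mk]; exact hs)).mp hg
        exact this
      have hsrc : src.filter (fun p => p.1 == k) = [(k, sv)] := filter_key_singleton src k sv hs hmem
      simp only [Function.comp, hgetD, htgt, hsrc, List.map_cons, List.map_nil,
        List.cons_append, List.nil_append, hg, pickMax_pair]
    | none =>
      have hnk : k ∉ src.map Prod.fst := by
        rw [PySem.Dict.get?_eq_none_iff_not_mem_keys, PySem.Dict.keys_mk] at hg
        exact hg
      have hsrc : src.filter (fun p => p.1 == k) = [] := filter_key_nil src k hnk
      simp only [Function.comp, hgetD, htgt, hsrc, List.map_cons, List.map_nil,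
        List.cons_append, List.nil_append, List.append_nil, pickMax_single]
  · -- the fresh-source-keys part
    have hid : (src.filter (fun kv => !((PySem.Dict.mk tgt).contains kv.1))).map
        ((fun k => (k, mpPickMax (buckets.getD k []))) ∘ Prod.fst) =
        (src.filter (fun kv => !((PySem.Dict.mk tgt).contains kv.1))).map (fun p => p) := by
      apply List.map_congr_left
      rintro ⟨k, v⟩ hkv
      rw [List.mem_filter] at hkv
      obtain ⟨hmem, hfresh⟩ := hkv
      have hnk : k ∉ tgt.map Prod.fst := by
        rw [PySem.Dict.contains_eq_decide_mem_keys, PySem.Dict.keys_mk] at hfresh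
        simpa using hfresh
      have htgt : tgt.filter (fun p => p.1 == k) = [] := filter_key_nil tgt k hnk
      have hsrc : src.filter (fun p => p.1 == k) = [(k, v)] := filter_key_singleton src k v hs hmem
      simp only [Function.comp, hgetD, htgt, hsrc, List.map_cons, List.map_nil,
        List.nil_append, pickMax_single]
    rw [hid]
    simp

-- ===== VERDICT (by name: the statement is the Claim_ definition above) =====
theorem merge_peers_spec : Claim_equal_merge_peers := by
  intro src tgt _ hpre
  unfold Spec_merge_peers merge_peers
  have hA := mp_main src (PySem.Dict.mk tgt) hpre.1 (by simpa using hpre.2)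
  rw [alt_eq_canon src tgt hpre.1 hpre.2]
  exact hA
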